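-- pv_equiv track=rewrite | github.com/epchao/cs61a-lab-eugene | lab01/lab01.py | double_eights
-- ===== SOURCE A (Python) =====
-- def double_eights(n):
--     """Return true if n has two eights in a row.
--     >>> double_eights(8)
--     False
--     >>> double_eights(88)
--     True
--     >>> double_eights(2882)
--     True
--     >>> double_eights(880088)
--     True
--     >>> double_eights(12345)
--     False
--     >>> double_eights(80808080)
--     False
--     """
--     prev = 0
--     curr = 0
--
--     while n != 0:
--         if curr == 8 and prev == 8:
--             return True
--         prev = n % 10
--
--         curr = (n // 10) % 10
--
--         n //= 10
--
--     return False
-- ===== SOURCE B (Python) =====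
-- def double_eights(n):
--     return '88' in str(n)
-- ===== Notes on version B (the rewrite author's own statement) =====
-- stated objective: idiomatic
-- what changed: replaces the digit-by-digit modulo/floor-division loop with prev/curr sliding state by a single substring test '88' in str(n) on the decimal representation
import Mathlib
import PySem

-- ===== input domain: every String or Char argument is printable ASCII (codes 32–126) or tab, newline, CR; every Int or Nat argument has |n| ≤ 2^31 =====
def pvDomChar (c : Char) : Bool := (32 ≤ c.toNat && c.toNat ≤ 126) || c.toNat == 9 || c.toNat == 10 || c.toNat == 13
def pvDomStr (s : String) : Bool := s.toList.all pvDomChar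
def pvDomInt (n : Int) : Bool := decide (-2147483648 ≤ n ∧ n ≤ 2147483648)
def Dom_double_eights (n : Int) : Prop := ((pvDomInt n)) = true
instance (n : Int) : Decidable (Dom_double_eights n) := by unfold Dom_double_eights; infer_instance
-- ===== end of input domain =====

-- B drops A's prev/curr digit-extraction loop and tests the substring '88' in str(n) (idiomatic; equivalence on n ≥ 0, where A terminates).

-- ===== PORT A =====
-- A's while loop, with the fuel guard only making the recursion total (for n ≥ 0 the
-- fuel n.natAbs + 1 is never exhausted, since n //= 10 strictly shrinks a positive n).
def doubleEightsLoop : Nat → Int → Int → Int → Bool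
  | 0, _, _, _ => false
  | fuel + 1, prev, curr, n =>
    if n ≠ 0 then
      if curr == 8 && prev == 8 then true
      else
        doubleEightsLoop fuel (PySem.Int.mod n 10)
          (PySem.Int.mod (PySem.Int.floordiv n 10) 10) (PySem.Int.floordiv n 10)
    else false

def double_eights (n : Int) : Bool := doubleEightsLoop (n.natAbs + 1) 0 0 n

-- ===== PORT B =====
def double_eights_alt (n : Int) : Bool := PySem.Str.isIn "88" (PySem.Int.toStr n)

-- ===== PRECONDITION & SPEC =====
-- Pre_ excludes n < 0, on which A's 'while n != 0: n //= 10' never terminates (Python floor division stalls at -1).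
def Pre_double_eights (n : Int) : Prop := 0 ≤ n
instance (n : Int) : Decidable (Pre_double_eights n) := by unfold Pre_double_eights; infer_instance
def pvWitness_double_eights : Int := (2882)

def Spec_double_eights (n : Int) (out : Bool) : Prop := out = double_eights_alt n
instance (n : Int) (out : Bool) : Decidable (Spec_double_eights n out) := by unfold Spec_double_eights; infer_instance

-- ===== CLAIM (what is proved, stated in full; the proofs are below) =====
def Claim_equal_double_eights : Prop := ∀ (n : Int), Dom_double_eights n → Pre_double_eights n → Spec_double_eights n (double_eights n)

-- ===== LEMMAS AND PROOFS =====

-- 'm has two adjacent 8s among its decimal digits': the common characterisation both ports are reduced to.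
def hasDD (m : Nat) : Bool :=
  if h : m < 10 then false
  else (m % 100 == 88) || hasDD (m / 10)
termination_by m
decreasing_by exact Nat.div_lt_self (by omega) (by omega)

-- Nat.toDigitsCore structure: the accumulator is appended on the right.
theorem tdc_append (f : Nat) : ∀ (n : Nat) (l : List Char),
    Nat.toDigitsCore 10 f n l = Nat.toDigitsCore 10 f n [] ++ l := by
  induction f with
  | zero => intro n l; simp [Nat.toDigitsCore]
  | succ f ih =>
    intro n l
    simp only [Nat.toDigitsCore]
    by_cases h : n / 10 = 0
    · simp [h]
    · simp only [h, if_false]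
      rw [ih (n / 10) ((n % 10).digitChar :: l), ih (n / 10) [(n % 10).digitChar]]
      simp

-- Fuel irrelevance of Nat.toDigitsCore once the fuel exceeds the number.
theorem tdc_fuel : ∀ (f f' n : Nat) (l : List Char), n < f → n < f' →
    Nat.toDigitsCore 10 f n l = Nat.toDigitsCore 10 f' n l := by
  intro f
  induction f with
  | zero => intro f' n l h; omega
  | succ f ih =>
    intro f' n l h h'
    cases f' with
    | zero => omega
    | succ f' =>
      simp only [Nat.toDigitsCore]
      by_cases h0 : n / 10 = 0
      · simp [h0]
      · simp only [h0, if_false]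
        exact ih f' (n / 10) _ (by omega) (by omega)

theorem toDigits_lt {m : Nat} (h : m < 10) : Nat.toDigits 10 m = [Nat.digitChar m] := by
  simp [Nat.toDigits, Nat.toDigitsCore, Nat.div_eq_of_lt h, Nat.mod_eq_of_lt h]

theorem toDigits_ge {m : Nat} (h : 10 ≤ m) :
    Nat.toDigits 10 m = Nat.toDigits 10 (m / 10) ++ [Nat.digitChar (m % 10)] := by
  have h0 : m / 10 ≠ 0 := by omega
  have step : Nat.toDigits 10 m = Nat.toDigitsCore 10 m (m / 10) [(m % 10).digitChar] := by
    rw [show Nat.toDigits 10 m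
        = if m / 10 = 0 then [(m % 10).digitChar]
          else Nat.toDigitsCore 10 m (m / 10) [(m % 10).digitChar] from rfl]
    simp [h0]
  rw [step, tdc_append m (m / 10) [(m % 10).digitChar],
    tdc_fuel m (m / 10 + 1) (m / 10) [] (by omega) (by omega)]
  rfl

theorem head?_reverse_toDigits (m : Nat) :
    (Nat.toDigits 10 m).reverse.head? = some (Nat.digitChar (m % 10)) := by
  by_cases h : m < 10
  · rw [toDigits_lt h, Nat.mod_eq_of_lt h]; rfl
  · rw [toDigits_ge (by omega)]; simp

theorem digitChar_eq_eight {k : Nat} (h : k < 10) : (Nat.digitChar k = '8') ↔ k = 8 := by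
  interval_cases k <;> simp [Nat.digitChar]

-- B's substring test over the digits equals the digit predicate hasDD.
theorem infix_rev_toDigits (m : Nat) :
    (['8', '8'] <:+: (Nat.toDigits 10 m).reverse) ↔ hasDD m = true := by
  induction m using Nat.strong_induction_on with
  | _ m ih =>
    by_cases h : m < 10
    · rw [toDigits_lt h]
      unfold hasDD
      simp only [h, dite_true]
      constructor
      · intro hinf
        have := hinf.length_le
        simp at this
      · intro hf; exact absurd hf (by simp)
    · have h10 : 10 ≤ m := by omega
      rw [toDigits_ge h10]
      have hrest := head?_reverse_toDigits (m / 10)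
      have hcons := List.cons_head?_tail (by rw [hrest]; rfl :
        Nat.digitChar (m / 10 % 10) ∈ (Nat.toDigits 10 (m / 10)).reverse.head?)
      unfold hasDD
      simp only [h, dite_false]
      rw [List.reverse_append]
      simp only [List.reverse_singleton, List.singleton_append]
      rw [List.infix_cons_iff]
      constructor
      · rintro (hpre | hinf)
        · rw [← hcons] at hpre
          rw [List.cons_prefix_cons] at hpre
          obtain ⟨h1, hpre⟩ := hpre
          rw [List.cons_prefix_cons] at hpre
          obtain ⟨h2, _⟩ := hpre
          have e1 : m % 10 = 8 := (digitChar_eq_eight (by omega)).mp h1.symm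
          have e2 : m / 10 % 10 = 8 := (digitChar_eq_eight (by omega)).mp h2.symm
          have : m % 100 = 88 := by omega
          simp [this]
        · have := (ih (m / 10) (by omega)).mp hinf
          simp [this]
      · intro hOr
        rcases Bool.or_eq_true_iff.mp hOr with h88 | hrec
        · left
          have e : m % 100 = 88 := by simpa using h88
          have e1 : m % 10 = 8 := by omega
          have e2 : m / 10 % 10 = 8 := by omega
          rw [← hcons, e1, e2]
          show ('8' : Char) :: ['8'] <+: Nat.digitChar 8 :: Nat.digitChar 8 :: _
          rw [List.cons_prefix_cons, List.cons_prefix_cons]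
          exact ⟨by decide, by decide, List.nil_prefix⟩
        · exact Or.inr ((ih (m / 10) (by omega)).mpr hrec)

-- A's loop, on a nonnegative input with enough fuel, equals the digit predicate
-- (with the one-step delay of the prev/curr state made explicit).
theorem loop_eq : ∀ (f : Nat) (m : Nat) (p c : Int), m < f →
    doubleEightsLoop f p c (m : Int)
      = (((decide (c = 8) && decide (p = 8)) && decide (m ≠ 0)) || hasDD m) := by
  intro f
  induction f with
  | zero => intro m p c h; omega
  | succ f ih =>
    intro m p c h
    by_cases hm : m = 0
    · subst hm
      unfold doubleEightsLoop
      simp [hasDD]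
    · have hm' : (m : Int) ≠ 0 := by exact_mod_cast hm
      unfold doubleEightsLoop
      rw [if_pos hm']
      by_cases hcp : c = 8 ∧ p = 8
      · obtain ⟨hc, hp⟩ := hcp
        simp [hc, hp, hm]
      · have hb : (c == 8 && p == 8) = false := by
          rcases Decidable.not_and_iff_not_or_not.mp hcp with h' | h' <;> simp [h']
        rw [hb]
        simp only [Bool.false_eq_true, if_false]
        have e10 : (10 : Int) = ((10 : Nat) : Int) := rfl
        rw [e10, PySem.Int.floordiv_natCast, PySem.Int.mod_natCast, PySem.Int.mod_natCast]
        rw [ih (m / 10) (↑(m % 10)) (↑(m / 10 % 10)) (by omega)]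
        have hbf : ((decide (c = 8) && decide (p = 8)) && decide (m ≠ 0)) = false := by
          rcases Decidable.not_and_iff_not_or_not.mp hcp with h' | h' <;> simp [h']
        rw [hbf, Bool.false_or]
        -- remaining: the shifted state equals hasDD m
        by_cases h10 : m < 10
        · have hd0 : m / 10 = 0 := by omega
          rw [hd0]
          unfold hasDD
          simp [h10]
        · conv_rhs => unfold hasDD
          simp only [h10, dite_false]
          congr 1
          apply Bool.coe_iff_coe.mp
          simp only [Bool.and_eq_true, decide_eq_true_eq, beq_iff_eq]
          omega

-- ===== VERDICT (by name: the statement is the Claim_ definition above) =====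
theorem double_eights_spec : Claim_equal_double_eights := by
  intro n _ hpre
  unfold Spec_double_eights double_eights double_eights_alt
  have hn : (0 : Int) ≤ n := hpre
  obtain ⟨m, rfl⟩ : ∃ m : Nat, n = (m : Int) := ⟨n.toNat, by omega⟩
  have hA : doubleEightsLoop ((m : Int).natAbs + 1) 0 0 (m : Int) = hasDD m := by
    rw [Int.natAbs_natCast, loop_eq (m + 1) m 0 0 (by omega)]
    simp
  rw [hA]
  have hiff : PySem.Str.isIn "88" (PySem.Int.toStr (m : Int)) = true ↔ hasDD m = true := by
    rw [PySem.Str.isIn_iff_infix, PySem.Int.toList_toStr]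
    have hch : PySem.Int.toChars (m : Int) = Nat.toDigits 10 m := by
      unfold PySem.Int.toChars
      simp
    rw [hch]
    have h88 : "88".toList = ['8', '8'] := by decide
    rw [h88, ← List.reverse_infix]
    show (['8', '8'].reverse <:+: (Nat.toDigits 10 m).reverse) ↔ _
    have hrev : (['8', '8'] : List Char).reverse = ['8', '8'] := by decide
    rw [hrev]
    exact infix_rev_toDigits m
  exact (Bool.coe_iff_coe.mp hiff).symm
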